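-- pv_equiv track=rewrite | github.com/Starchild-ai-agent/official-skills | 1inch/exports.py | _extract_sol_sig_b58
-- ===== SOURCE A (Python) =====
-- def _extract_sol_sig_b58(signed_b64: str) -> str:
--     """Extract ed25519 signature from Privy-signed Solana tx and encode as base58."""
--     import base64
--     _ALPHA = '123456789ABCDEFGHJKLMNPQRSTUVWXYZabcdefghijkmnopqrstuvwxyz'
--     signed_bytes = base64.b64decode(signed_b64)
--     sig_64 = signed_bytes[1:65]
--
--     n = int.from_bytes(sig_64, 'big')
--     result = ''
--     while n:
--         n, r = divmod(n, 58)
--         result = _ALPHA[r] + result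
--     for b in sig_64:
--         if b == 0:
--             result = '1' + result
--         else:
--             break
--     return result
-- ===== SOURCE B (Python) =====
-- _ALPHA58 = '123456789ABCDEFGHJKLMNPQRSTUVWXYZabcdefghijkmnopqrstuvwxyz'
-- _B64 = 'ABCDEFGHIJKLMNOPQRSTUVWXYZabcdefghijklmnopqrstuvwxyz0123456789+/'
--
--
-- def _b64_to_bytes(s):
--     """Compact base64 decoder (bit accumulator): characters outside the alphabet
--     are skipped, '=' padding closes the final group, leftover characters are an
--     error."""
--     out = []
--     buf = n = pads = 0
--     for c in s:
--         if c == '=':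
--             if n >= 2:
--                 pads += 1
--                 if n + pads >= 4:
--                     if n == 2:
--                         out.append(buf >> 4)
--                     else:
--                         out.append(buf >> 10)
--                         out.append((buf >> 2) & 255)
--                     return out
--             continue
--         v = _B64.find(c)
--         if v < 0:
--             continue
--         pads = 0
--         buf = (buf << 6) | v
--         n += 1
--         if n == 4:
--             out.append(buf >> 16)
--             out.append((buf >> 8) & 255)
--             out.append(buf & 255)
--             buf = n = 0
--     if n:
--         raise ValueError('invalid base64 input')
--     return out
--
--
-- def _extract_sol_sig_b58(signed_b64: str) -> str:
--     """Extract ed25519 signature from Privy-signed Solana tx and encode as base58."""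
--     sig_64 = _b64_to_bytes(signed_b64)[1:65]
--
--     digits = []  # little-endian base-58 digits
--     for b in sig_64:
--         carry = b
--         for i in range(len(digits)):
--             carry += digits[i] * 256
--             digits[i] = carry % 58
--             carry //= 58
--         while carry:
--             digits.append(carry % 58)
--             carry //= 58
--     zeros = 0
--     for b in sig_64:
--         if b:
--             break
--         zeros += 1
--     return '1' * zeros + ''.join(_ALPHA58[d] for d in reversed(digits))
-- ===== Notes on version B (the rewrite author's own statement) =====
-- stated objective: alternative
-- what changed: B is self-contained: a compact bit-accumulator base64 decoder (6-bit groups, non-alphabet characters skipped, '=' padding closes the final group) replaces the base64.b64decode call, and the classic byte-array base58 encoder (little-endian digit list with in-place carry propagation) replaces the bigint int.from_bytes + divmod-58 loop. Pre_ excludes exactly the malformed-base64 inputs on which both programs raise.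
import Mathlib
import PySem

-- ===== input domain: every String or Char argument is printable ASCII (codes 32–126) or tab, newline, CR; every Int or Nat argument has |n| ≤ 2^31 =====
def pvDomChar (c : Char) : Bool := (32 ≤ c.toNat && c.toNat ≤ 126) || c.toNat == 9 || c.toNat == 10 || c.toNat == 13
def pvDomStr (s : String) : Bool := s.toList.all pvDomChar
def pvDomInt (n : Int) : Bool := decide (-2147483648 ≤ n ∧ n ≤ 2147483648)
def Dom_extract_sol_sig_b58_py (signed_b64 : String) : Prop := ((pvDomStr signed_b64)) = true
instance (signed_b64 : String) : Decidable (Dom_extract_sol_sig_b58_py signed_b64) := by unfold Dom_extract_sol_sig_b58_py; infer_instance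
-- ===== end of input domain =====

-- B is self-contained: a bit-accumulator base64 decoder plus the classic byte-array
-- base-58 encoder replace A's base64.b64decode call and bigint divmod-58 loop.

-- shared table: index of c in the base64 alphabet (A: part of base64.b64decode,
-- hand-ported below; B: _B64.find(c)); exact on ASCII input.
def pvB64Digit? (c : Char) : Option Nat :=
  if 'A' ≤ c ∧ c ≤ 'Z' then some (c.toNat - 65)
  else if 'a' ≤ c ∧ c ≤ 'z' then some (c.toNat - 97 + 26)
  else if '0' ≤ c ∧ c ≤ '9' then some (c.toNat - 48 + 52)
  else if c = '+' then some 62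
  else if c = '/' then some 63
  else none

def pvB64Go (cs : List Char) (qp lc pads : Nat) (acc : List Nat) : Option (List Nat) :=
  match cs with
  | [] => if qp = 0 then some acc else none
  | c :: rest =>
    if c = '=' then
      if 2 ≤ qp then
        if 4 ≤ qp + (pads + 1) then some acc
        else pvB64Go rest qp lc (pads + 1) acc
      else pvB64Go rest qp lc pads acc
    else
      match pvB64Digit? c with
      | none => pvB64Go rest qp lc pads acc
      | some v =>
        match qp with
        | 0 => pvB64Go rest 1 v 0 acc
        | 1 => pvB64Go rest 2 (v % 16) 0 (acc ++ [lc * 4 + v / 16])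
        | 2 => pvB64Go rest 3 (v % 4) 0 (acc ++ [lc * 16 + v / 4])
        | _ => pvB64Go rest 0 0 0 (acc ++ [lc * 64 + v])

def pvB64Decode? (s : String) : Option (List Nat) := pvB64Go s.toList 0 0 0 []

-- _ALPHA[d]
def pvAlpha (d : Nat) : Char :=
  "123456789ABCDEFGHJKLMNPQRSTUVWXYZabcdefghijkmnopqrstuvwxyz".toList.getD d ' '

-- hand port of A's base64.b64decode call (binascii.a2b_base64, non-strict mode);
-- exact on ASCII input: non-alphabet chars are skipped, '=' at quad position >= 2
-- with enough pads ends decoding, a final partial quad raises (here: none).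
-- (definitions above, shared table pvB64Digit? aside, belong to PORT A)

-- ===== PORT A =====
-- n = int.from_bytes(sig_64, 'big')
def pvFromBytes (bs : List Nat) : Nat := bs.foldl (fun a b => a * 256 + b) 0

-- while n: n, r = divmod(n, 58); result = _ALPHA[r] + result
def pvEncA (n : Nat) (acc : List Char) : List Char :=
  if h : n = 0 then acc
  else pvEncA (n / 58) (pvAlpha (n % 58) :: acc)
  decreasing_by exact Nat.div_lt_self (Nat.pos_of_ne_zero h) (by norm_num)

-- for b in sig_64: if b == 0: result = '1' + result else: break
def pvOnesA (bs : List Nat) (res : List Char) : List Char :=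
  match bs with
  | [] => res
  | b :: t => if b = 0 then pvOnesA t ('1' :: res) else res

def extract_sol_sig_b58_py (signed_b64 : String) : String :=
  match pvB64Decode? signed_b64 with
  | none => ""  -- unreachable under Pre_ (b64decode raises)
  | some signed_bytes =>
    let sig_64 := PySem.List.slice signed_bytes (some (1 : Int)) (some (65 : Int))
    String.ofList (pvOnesA sig_64 (pvEncA (pvFromBytes sig_64) []))

-- ===== PORT B =====
-- _b64_to_bytes: bit-accumulator base64 decoder (buf = pending bits, n = data chars
-- in the current group, pads counted after '='); none = the ValueError branch
def pvB64GoB (cs : List Char) (buf n pads : Nat) (out : List Nat) : Option (List Nat) :=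
  match cs with
  | [] => if n = 0 then some out else none
  | c :: rest =>
    if c = '=' then
      if 2 ≤ n then
        if 4 ≤ n + (pads + 1) then
          some (if n = 2 then out ++ [buf / 16] else out ++ [buf / 1024, (buf / 4) % 256])
        else pvB64GoB rest buf n (pads + 1) out
      else pvB64GoB rest buf n pads out
    else
      match pvB64Digit? c with
      | none => pvB64GoB rest buf n pads out
      | some v =>
        if n + 1 = 4 then
          pvB64GoB rest 0 0 0
            (out ++ [(buf * 64 + v) / 65536, ((buf * 64 + v) / 256) % 256, (buf * 64 + v) % 256])
        else pvB64GoB rest (buf * 64 + v) (n + 1) 0 out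

def pvB64DecodeB? (s : String) : Option (List Nat) := pvB64GoB s.toList 0 0 0 []

-- inner loop: for i in range(len(digits)): carry += digits[i]*256; digits[i] = carry%58; carry //= 58
def pvProp (carry : Nat) (ds : List Nat) : List Nat × Nat :=
  match ds with
  | [] => ([], carry)
  | d :: t =>
    let c := carry + d * 256
    let r := pvProp (c / 58) t
    (c % 58 :: r.1, r.2)

-- while carry: digits.append(carry % 58); carry //= 58
def pvExt (carry : Nat) : List Nat :=
  if h : carry = 0 then []
  else carry % 58 :: pvExt (carry / 58)
  decreasing_by exact Nat.div_lt_self (Nat.pos_of_ne_zero h) (by norm_num)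

def pvStep (ds : List Nat) (b : Nat) : List Nat :=
  let p := pvProp b ds
  p.1 ++ pvExt p.2

-- zeros = number of leading zero bytes
def extract_sol_sig_b58_py_alt (signed_b64 : String) : String :=
  match pvB64DecodeB? signed_b64 with
  | none => ""  -- unreachable under Pre_ (the ValueError branch)
  | some signed_bytes =>
    let sig_64 := PySem.List.slice signed_bytes (some (1 : Int)) (some (65 : Int))
    let digits := sig_64.foldl pvStep []
    let zeros := (sig_64.takeWhile (fun b => b == 0)).length
    String.ofList (List.replicate zeros '1' ++ (digits.reverse.map pvAlpha))

-- ===== PRECONDITION & SPEC =====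
-- number of base64-alphabet characters among the first j characters
def pvB64Data (cs : List Char) (j : Nat) : Nat :=
  ((cs.take j).filter (fun c => (pvB64Digit? c).isSome)).length

-- Pre_ excludes exactly the inputs on which base64.b64decode raises binascii.Error
-- (both programs raise there): signed_b64 is valid base64 in CPython's non-strict
-- sense, i.e. either the total number of alphabet characters is a multiple of 4, or
-- some padding character terminates decoding (it follows 4k+3 alphabet characters,
-- or 4k+2 with an earlier padding character and no alphabet character in between).
def Pre_extract_sol_sig_b58_py (signed_b64 : String) : Prop :=
  pvB64Data signed_b64.toList signed_b64.toList.length % 4 = 0 ∨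
  ∃ j < signed_b64.toList.length, signed_b64.toList.getD j ' ' = '=' ∧
    (pvB64Data signed_b64.toList j % 4 = 3 ∨
     (pvB64Data signed_b64.toList j % 4 = 2 ∧
      ∃ k < j, signed_b64.toList.getD k ' ' = '=' ∧
        pvB64Data signed_b64.toList k = pvB64Data signed_b64.toList j))
instance (signed_b64 : String) : Decidable (Pre_extract_sol_sig_b58_py signed_b64) := by
  unfold Pre_extract_sol_sig_b58_py; infer_instance

def pvWitness_extract_sol_sig_b58_py : String := "AUJi"

def Spec_extract_sol_sig_b58_py (signed_b64 : String) (out : String) : Prop := out = extract_sol_sig_b58_py_alt signed_b64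
instance (signed_b64 : String) (out : String) : Decidable (Spec_extract_sol_sig_b58_py signed_b64 out) := by unfold Spec_extract_sol_sig_b58_py; infer_instance

-- ===== CLAIM (what is proved, stated in full; the proofs are below) =====
def Claim_equal_extract_sol_sig_b58_py : Prop := ∀ (signed_b64 : String), Dom_extract_sol_sig_b58_py signed_b64 → Pre_extract_sol_sig_b58_py signed_b64 → Spec_extract_sol_sig_b58_py signed_b64 (extract_sol_sig_b58_py signed_b64)

-- ===== LEMMAS AND PROOFS =====

-- every alphabet index is a 6-bit value
theorem pvB64Digit?_lt {c : Char} {v : Nat} (h : pvB64Digit? c = some v) : v < 64 := by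
  unfold pvB64Digit? at h
  split_ifs at h with h1 h2 h3 h4 h5 <;> rw [Option.some.injEq] at h <;> subst h
  · obtain ⟨_, hb⟩ := h1
    have hb' : c.toNat ≤ 90 := by simp [Char.le_def] at hb; exact hb
    omega
  · obtain ⟨_, hb⟩ := h2
    have hb' : c.toNat ≤ 122 := by simp [Char.le_def] at hb; exact hb
    omega
  · obtain ⟨_, hb⟩ := h3
    have hb' : c.toNat ≤ 57 := by simp [Char.le_def] at hb; exact hb
    omega
  · omega
  · omega

-- A's state (qp, lc, acc) reconstructed from B's state (buf, n, out)
def pvAccOf (buf n : Nat) (out : List Nat) : List Nat :=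
  match n with
  | 2 => out ++ [buf / 16]
  | 3 => out ++ [buf / 1024, (buf / 4) % 256]
  | _ => out

def pvLcOf (buf n : Nat) : Nat :=
  match n with
  | 1 => buf
  | 2 => buf % 16
  | 3 => buf % 4
  | _ => 0

-- the two base64 decoders compute the same result
theorem pvB64GoB_eq (cs : List Char) : ∀ (buf n pads lc : Nat) (out : List Nat),
    n < 4 → buf < 64 ^ n → (n = 0 ∨ lc = pvLcOf buf n) →
    pvB64GoB cs buf n pads out = pvB64Go cs n lc pads (pvAccOf buf n out) := by
  induction cs with
  | nil =>
    intro buf n pads lc out hn hb hlc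
    match n with
    | 0 => simp [pvB64GoB, pvB64Go, pvAccOf]
    | 1 | 2 | 3 => simp [pvB64GoB, pvB64Go]
  | cons c t ih =>
    intro buf n pads lc out hn hb hlc
    by_cases hpad : c = '='
    · subst hpad
      rw [pvB64GoB, pvB64Go, if_pos rfl, if_pos rfl]
      by_cases h2 : 2 ≤ n
      · rw [if_pos h2, if_pos h2]
        by_cases h4 : 4 ≤ n + (pads + 1)
        · rw [if_pos h4, if_pos h4]
          match n, hn with
          | 2, _ => simp [pvAccOf]
          | 3, _ => simp [pvAccOf]
        · rw [if_neg h4, if_neg h4]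
          exact ih buf n (pads + 1) lc out hn hb hlc
      · rw [if_neg h2, if_neg h2]
        exact ih buf n pads lc out hn hb hlc
    · cases hv : pvB64Digit? c with
      | none =>
        simp only [pvB64GoB, pvB64Go, if_neg hpad, hv]
        exact ih buf n pads lc out hn hb hlc
      | some v =>
        have hv64 : v < 64 := pvB64Digit?_lt hv
        match n, hn with
        | 0, _ =>
          have h0 : buf = 0 := by simpa using hb
          subst h0
          simp only [pvB64GoB, pvB64Go, if_neg hpad, hv]
          have := ih v 1 0 v out (by omega) (by simpa using hv64) (Or.inr rfl)
          simpa [pvAccOf] using this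
        | 1, _ =>
          rcases hlc with h | h; · omega
          simp only [pvLcOf] at h; rw [h]
          have hb' : buf < 64 := by simpa using hb
          simp only [pvB64GoB, pvB64Go, if_neg hpad, hv]
          have := ih (buf * 64 + v) 2 0 ((buf * 64 + v) % 16) out (by omega)
            (by simp [pow_succ]; omega) (Or.inr rfl)
          rw [this]
          have e1 : (buf * 64 + v) % 16 = v % 16 := by omega
          have e2 : (buf * 64 + v) / 16 = buf * 4 + v / 16 := by omega
          simp [pvAccOf, e1, e2]
        | 2, _ =>
          rcases hlc with h | h; · omega
          simp only [pvLcOf] at h; rw [h]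
          have hb' : buf < 4096 := by simpa [pow_succ] using hb
          simp only [pvB64GoB, pvB64Go, if_neg hpad, hv, reduceIte]
          have := ih (buf * 64 + v) 3 0 ((buf * 64 + v) % 4) out (by omega)
            (by simp [pow_succ]; omega) (Or.inr rfl)
          rw [this]
          have e1 : (buf * 64 + v) % 4 = v % 4 := by omega
          have e2 : (buf * 64 + v) / 1024 = buf / 16 := by omega
          have e3 : ((buf * 64 + v) / 4) % 256 = (buf % 16) * 16 + v / 4 := by omega
          simp [pvAccOf, e1, e2, e3]
        | 3, _ =>
          rcases hlc with h | h; · omega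
          simp only [pvLcOf] at h; rw [h]
          have hb' : buf < 262144 := by simpa [pow_succ] using hb
          simp only [pvB64GoB, pvB64Go, if_neg hpad, hv, reduceIte]
          have := ih 0 0 0 0
            (out ++ [(buf * 64 + v) / 65536, ((buf * 64 + v) / 256) % 256, (buf * 64 + v) % 256])
            (by omega) (by simp) (Or.inl rfl)
          rw [this]
          have e1 : (buf * 64 + v) / 65536 = buf / 1024 := by omega
          have e2 : ((buf * 64 + v) / 256) % 256 = (buf / 4) % 256 := by omega
          have e3 : (buf * 64 + v) % 256 = (buf % 4) * 64 + v := by omega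
          simp [pvAccOf, e1, e2, e3]

theorem pvB64DecodeB?_eq (s : String) : pvB64DecodeB? s = pvB64Decode? s := by
  unfold pvB64DecodeB? pvB64Decode?
  exact pvB64GoB_eq s.toList 0 0 0 0 [] (by omega) (by simp) (Or.inl rfl)

-- canonical little-endian base-58 digits
def pvCanon (n : Nat) : List Nat :=
  if h : n = 0 then []
  else n % 58 :: pvCanon (n / 58)
  decreasing_by exact Nat.div_lt_self (Nat.pos_of_ne_zero h) (by norm_num)

def pvVal (ds : List Nat) : Nat := ds.foldr (fun d a => d + 58 * a) 0

-- "top (most significant) digit, if any, is nonzero"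
def pvTopOK (ds : List Nat) : Bool :=
  match ds with
  | [] => true
  | d :: t => if t.isEmpty then d != 0 else pvTopOK t

theorem pvCanon_zero : pvCanon 0 = [] := by unfold pvCanon; simp

theorem pvCanon_pos {n : Nat} (h : n ≠ 0) : pvCanon n = n % 58 :: pvCanon (n / 58) := by
  rw [pvCanon]; simp [h]

theorem pvExt_eq_canon (c : Nat) : pvExt c = pvCanon c := by
  induction c using Nat.strong_induction_on with
  | _ c ih =>
    by_cases h : c = 0
    · subst h; rw [pvExt, pvCanon]; simp
    · rw [pvExt, pvCanon]
      simp only [h, dite_false]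
      rw [ih (c / 58) (Nat.div_lt_self (Nat.pos_of_ne_zero h) (by norm_num))]

theorem pvCanon_val (n : Nat) : pvVal (pvCanon n) = n := by
  induction n using Nat.strong_induction_on with
  | _ n ih =>
    by_cases h : n = 0
    · subst h; simp [pvCanon_zero, pvVal]
    · rw [pvCanon_pos h]
      simp only [pvVal, List.foldr] at *
      rw [ih (n / 58) (Nat.div_lt_self (Nat.pos_of_ne_zero h) (by norm_num))]
      omega

theorem pvCanon_lt (n : Nat) : ∀ d ∈ pvCanon n, d < 58 := by
  induction n using Nat.strong_induction_on with
  | _ n ih =>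
    by_cases h : n = 0
    · simp [h, pvCanon_zero]
    · rw [pvCanon_pos h]
      intro d hd
      rcases List.mem_cons.mp hd with h1 | h2
      · subst h1; exact Nat.mod_lt _ (by norm_num)
      · exact ih (n / 58) (Nat.div_lt_self (Nat.pos_of_ne_zero h) (by norm_num)) d h2

theorem pvCanon_top (n : Nat) : pvTopOK (pvCanon n) = true := by
  induction n using Nat.strong_induction_on with
  | _ n ih =>
    by_cases h : n = 0
    · simp [h, pvCanon_zero, pvTopOK]
    · rw [pvCanon_pos h]
      by_cases h2 : n / 58 = 0
      · have : n % 58 ≠ 0 := by omega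
        simp [h2, pvCanon_zero, pvTopOK, this]
      · have hne : pvCanon (n / 58) ≠ [] := by rw [pvCanon_pos h2]; simp
        have := ih (n / 58) (Nat.div_lt_self (Nat.pos_of_ne_zero h) (by norm_num))
        simp [pvTopOK, List.isEmpty_iff, hne, this]

theorem pvVal_eq_zero_top {ds : List Nat} (hv : pvVal ds = 0)
    (hl : pvTopOK ds = true) : ds = [] := by
  induction ds with
  | nil => rfl
  | cons d t ih =>
    simp only [pvVal, List.foldr] at hv
    have hd : d = 0 := by omega
    have hvt : pvVal t = 0 := by simp only [pvVal]; omega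
    by_cases ht : t = []
    · subst ht; subst hd
      simp [pvTopOK] at hl
    · have hl2 : pvTopOK t = true := by
        simpa [pvTopOK, List.isEmpty_iff, ht] using hl
      exact absurd (ih hvt hl2) ht

theorem pvCanon_unique (ds : List Nat) (hlt : ∀ d ∈ ds, d < 58)
    (hl : pvTopOK ds = true) : pvCanon (pvVal ds) = ds := by
  induction ds with
  | nil => simp [pvCanon_zero, pvVal]
  | cons d t ih =>
    have hd : d < 58 := hlt d (by simp)
    simp only [pvVal, List.foldr]
    by_cases hz : d + 58 * (t.foldr (fun d a => d + 58 * a) 0) = 0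
    · have : (d :: t) = [] := pvVal_eq_zero_top (by simp only [pvVal, List.foldr]; omega) hl
      simp at this
    · rw [pvCanon_pos hz]
      have hmod : (d + 58 * (t.foldr (fun d a => d + 58 * a) 0)) % 58 = d := by omega
      have hdiv : (d + 58 * (t.foldr (fun d a => d + 58 * a) 0)) / 58 =
          t.foldr (fun d a => d + 58 * a) 0 := by omega
      rw [hmod, hdiv]
      by_cases ht : t = []
      · subst ht; simp [pvCanon_zero]
      · have hl2 : pvTopOK t = true := by
          simpa [pvTopOK, List.isEmpty_iff, ht] using hl
        have := ih (fun x hx => hlt x (by simp [hx])) hl2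
        simp only [pvVal] at this
        rw [this]

theorem pvTopOK_append {l1 l2 : List Nat} (h : l2 ≠ []) :
    pvTopOK (l1 ++ l2) = pvTopOK l2 := by
  induction l1 with
  | nil => simp
  | cons a t ih =>
    have hne : t ++ l2 ≠ [] := by simp [h]
    simp [pvTopOK, List.isEmpty_iff, hne, ih]

theorem pvProp_spec (ds : List Nat) : ∀ carry : Nat,
    pvVal (pvProp carry ds).1 + 58 ^ ds.length * (pvProp carry ds).2 = carry + 256 * pvVal ds
    ∧ (∀ d ∈ (pvProp carry ds).1, d < 58) := by
  induction ds with
  | nil => intro carry; simp [pvProp, pvVal]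
  | cons d t ih =>
    intro carry
    obtain ⟨ihv, ihlt⟩ := ih ((carry + d * 256) / 58)
    constructor
    · simp only [pvProp, pvVal, List.foldr, List.length_cons] at *
      have : (carry + d * 256) % 58 + 58 * ((carry + d * 256) / 58) = carry + d * 256 := by omega
      ring_nf
      ring_nf at ihv
      nlinarith [ihv, this]
    · intro x hx
      simp only [pvProp, List.mem_cons] at hx
      rcases hx with h1 | h2
      · subst h1; exact Nat.mod_lt _ (by norm_num)
      · exact ihlt x h2

theorem pvProp_carry_pos (ds : List Nat) : ∀ carry, ds ≠ [] → pvTopOK ds = true →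
    (pvProp carry ds).2 ≠ 0 := by
  induction ds with
  | nil => simp
  | cons d t ih =>
    intro carry _ htop
    by_cases ht : t = []
    · subst ht
      have hd : d ≠ 0 := by simpa [pvTopOK] using htop
      simp only [pvProp]
      omega
    · have hl2 : pvTopOK t = true := by
        simpa [pvTopOK, List.isEmpty_iff, ht] using htop
      simp only [pvProp]
      exact ih _ ht hl2

theorem pvProp_length (ds : List Nat) : ∀ carry, (pvProp carry ds).1.length = ds.length := by
  induction ds with
  | nil => simp [pvProp]
  | cons a t ih => intro carry; simp [pvProp, ih]

theorem pvVal_append (l1 l2 : List Nat) :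
    pvVal (l1 ++ l2) = pvVal l1 + 58 ^ l1.length * pvVal l2 := by
  induction l1 with
  | nil => simp [pvVal]
  | cons a t iht =>
    simp only [pvVal, List.foldr, List.cons_append, List.length_cons] at *
    rw [iht]; ring

theorem pvStep_canon (m b : Nat) : pvStep (pvCanon m) b = pvCanon (m * 256 + b) := by
  by_cases hm : m = 0
  · subst hm
    simp [pvStep, pvCanon_zero, pvProp, pvExt_eq_canon]
  · obtain ⟨hv, hlt⟩ := pvProp_spec (pvCanon m) b
    have hcanonval := pvCanon_val m
    have hne : pvCanon m ≠ [] := by rw [pvCanon_pos hm]; simp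
    have hco : (pvProp b (pvCanon m)).2 ≠ 0 :=
      pvProp_carry_pos (pvCanon m) b hne (pvCanon_top m)
    have hres : pvStep (pvCanon m) b
        = (pvProp b (pvCanon m)).1 ++ pvCanon (pvProp b (pvCanon m)).2 := by
      simp [pvStep, pvExt_eq_canon]
    rw [hres]
    have hvalapp : pvVal ((pvProp b (pvCanon m)).1 ++ pvCanon (pvProp b (pvCanon m)).2)
        = m * 256 + b := by
      rw [pvVal_append, pvProp_length, pvCanon_val]
      rw [hcanonval] at hv
      omega
    have hne2 : pvCanon (pvProp b (pvCanon m)).2 ≠ [] := by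
      rw [pvCanon_pos hco]; simp
    have hca : pvCanon (pvVal ((pvProp b (pvCanon m)).1 ++ pvCanon (pvProp b (pvCanon m)).2))
        = (pvProp b (pvCanon m)).1 ++ pvCanon (pvProp b (pvCanon m)).2 := by
      apply pvCanon_unique
      · intro d hd
        rcases List.mem_append.mp hd with h1 | h2
        · exact hlt d h1
        · exact pvCanon_lt _ d h2
      · rw [pvTopOK_append hne2]
        exact pvCanon_top _
    rw [hvalapp] at hca
    exact hca.symm

theorem pvFoldl_step (bs : List Nat) : ∀ m : Nat,
    bs.foldl pvStep (pvCanon m) = pvCanon (bs.foldl (fun a b => a * 256 + b) m) := by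
  induction bs with
  | nil => intro m; simp
  | cons b t ih =>
    intro m
    simp only [List.foldl]
    rw [pvStep_canon, ih]

theorem pvEncA_eq (n : Nat) : ∀ acc, pvEncA n acc = (pvCanon n).reverse.map pvAlpha ++ acc := by
  induction n using Nat.strong_induction_on with
  | _ n ih =>
    intro acc
    by_cases h : n = 0
    · subst h; rw [pvEncA]; simp [pvCanon_zero]
    · rw [pvEncA]
      simp only [h, dite_false]
      rw [ih (n / 58) (Nat.div_lt_self (Nat.pos_of_ne_zero h) (by norm_num)), pvCanon_pos h]
      simp

theorem pvOnesA_eq (bs : List Nat) : ∀ res,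
    pvOnesA bs res = List.replicate (bs.takeWhile (fun b => b == 0)).length '1' ++ res := by
  induction bs with
  | nil => intro res; simp [pvOnesA]
  | cons b t ih =>
    intro res
    by_cases hb : b = 0
    · subst hb
      simp only [pvOnesA, List.takeWhile]
      rw [ih]
      simp [List.replicate_succ']
    · have : (b == 0) = false := by simpa using hb
      simp [pvOnesA, hb, List.takeWhile, this]

-- total alphabet-character count (pvB64Data cs j = pvDC (cs.take j) definitionally)
def pvDC (cs : List Char) : Nat := (cs.filter (fun c => (pvB64Digit? c).isSome)).length

theorem pvB64Digit?_pad : pvB64Digit? '=' = none := by decide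

-- Pre_ (generalized to a mid-scan state) implies the decoder succeeds
theorem pvB64Go_some (cs : List Char) : ∀ (qp lc pads : Nat) (acc : List Nat), qp < 4 →
    ((qp + pvDC cs) % 4 = 0 ∨
     ∃ j < cs.length, cs.getD j ' ' = '=' ∧
       ((qp + pvDC (cs.take j)) % 4 = 3 ∨
        ((qp + pvDC (cs.take j)) % 4 = 2 ∧
          ((pvDC (cs.take j) = 0 ∧ 1 ≤ pads) ∨
           ∃ k < j, cs.getD k ' ' = '=' ∧ pvDC (cs.take k) = pvDC (cs.take j))))) →
    (pvB64Go cs qp lc pads acc).isSome := by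
  induction cs with
  | nil =>
    intro qp lc pads acc hqp h
    rcases h with h | ⟨j, hj, _⟩
    · simp [pvDC] at h
      have : qp = 0 := by omega
      simp [pvB64Go, this]
    · simp at hj
  | cons c t ih =>
    intro qp lc pads acc hqp h
    by_cases hpad : c = '='
    · subst hpad
      -- shift the hypothesis to the tail with pads or pads+1
      have hshift : ∀ pads', 1 ≤ pads' → pads ≤ pads' →
          ((qp + pvDC t) % 4 = 0 ∨
           ∃ j < t.length, t.getD j ' ' = '=' ∧
             ((qp + pvDC (t.take j)) % 4 = 3 ∨
              ((qp + pvDC (t.take j)) % 4 = 2 ∧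
                ((pvDC (t.take j) = 0 ∧ 1 ≤ pads') ∨
                 ∃ k < j, t.getD k ' ' = '=' ∧ pvDC (t.take k) = pvDC (t.take j))))) ∨
          (2 ≤ qp ∧ (qp % 4 = 3 ∨ qp % 4 = 2 ∧ 1 ≤ pads)) := by
        intro pads' hp1 hpmono
        rcases h with h1 | ⟨j, hj, hje, hcond⟩
        · left; left; simpa [pvDC, pvB64Digit?_pad] using h1
        · match j, hj with
          | 0, _ =>
            -- the condition speaks about this very pad character
            simp only [List.take_zero, pvDC, List.filter_nil, List.length_nil,
              Nat.add_zero] at hcond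
            rcases hcond with h3 | ⟨h2, hk⟩
            · right; exact ⟨by omega, Or.inl (by omega)⟩
            · rcases hk with ⟨hz, hp⟩ | ⟨k, hk, _⟩
              · right; exact ⟨by omega, Or.inr ⟨by omega, hp⟩⟩
              · omega
          | j' + 1, hj =>
            left; right
            refine ⟨j', by simpa using hj, by simpa using hje, ?_⟩
            have hdc : pvDC ((('=') :: t).take (j' + 1)) = pvDC (t.take j') := by
              simp [pvDC, pvB64Digit?_pad]
            rw [hdc] at hcond
            rcases hcond with h3 | ⟨h2, hk⟩
            · exact Or.inl h3
            · refine Or.inr ⟨h2, ?_⟩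
              rcases hk with ⟨hz, hp⟩ | ⟨k, hk, hke, hkd⟩
              · exact Or.inl ⟨hz, by omega⟩
              · match k, hk with
                | 0, _ =>
                  -- the earlier pad is this very character: switch to the pads branch
                  simp only [List.take_zero, pvDC, List.filter_nil, List.length_nil] at hkd
                  exact Or.inl ⟨hkd.symm, hp1⟩
                | k' + 1, hk =>
                  refine Or.inr ⟨k', by simpa using hk, by simpa using hke, ?_⟩
                  have hdk : pvDC ((('=') :: t).take (k' + 1)) = pvDC (t.take k') := by
                    simp [pvDC, pvB64Digit?_pad]
                  rw [hdk] at hkd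
                  exact hkd
      rw [pvB64Go]
      rw [if_pos rfl]
      by_cases h2 : 2 ≤ qp
      · rw [if_pos h2]
        by_cases h4 : 4 ≤ qp + (pads + 1)
        · simp [h4]
        · rw [if_neg h4]
          rcases hshift (pads + 1) (by omega) (by omega) with hnew | ⟨_, hterm⟩
          · exact ih qp lc (pads + 1) acc hqp hnew
          · rcases hterm with h3 | ⟨h2', hp⟩ <;> omega
      · rw [if_neg h2]
        rcases hshift (max pads 1) (by omega) (by omega) with hnew | ⟨h2', _⟩
        · -- pads branch needs 1 ≤ pads': but here qp < 2 makes that branch impossible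
          apply ih qp lc pads acc hqp
          rcases hnew with h1 | ⟨j, hj, hje, hcond⟩
          · exact Or.inl h1
          · refine Or.inr ⟨j, hj, hje, ?_⟩
            rcases hcond with h3 | ⟨hq2, hk⟩
            · exact Or.inl h3
            · refine Or.inr ⟨hq2, ?_⟩
              rcases hk with ⟨hz, _⟩ | hk
              · -- pvDC (take j) = 0 and (qp + 0) % 4 = 2 contradict qp < 2
                omega
              · exact Or.inr hk
        · omega
    · cases hv : pvB64Digit? c with
      | none =>
        -- skipped character: state unchanged, counts unchanged
        have hnew :
            ((qp + pvDC t) % 4 = 0 ∨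
             ∃ j < t.length, t.getD j ' ' = '=' ∧
               ((qp + pvDC (t.take j)) % 4 = 3 ∨
                ((qp + pvDC (t.take j)) % 4 = 2 ∧
                  ((pvDC (t.take j) = 0 ∧ 1 ≤ pads) ∨
                   ∃ k < j, t.getD k ' ' = '=' ∧ pvDC (t.take k) = pvDC (t.take j))))) := by
          rcases h with h1 | ⟨j, hj, hje, hcond⟩
          · left; simpa [pvDC, hv] using h1
          · match j, hj with
            | 0, _ => simp at hje; exact absurd hje hpad
            | j' + 1, hj =>
              right
              refine ⟨j', by simpa using hj, by simpa using hje, ?_⟩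
              have hdc : pvDC ((c :: t).take (j' + 1)) = pvDC (t.take j') := by
                simp [pvDC, hv]
              rw [hdc] at hcond
              rcases hcond with h3 | ⟨h2, hk⟩
              · exact Or.inl h3
              · refine Or.inr ⟨h2, ?_⟩
                rcases hk with hp | ⟨k, hk, hke, hkd⟩
                · exact Or.inl hp
                · match k, hk with
                  | 0, _ => simp at hke; exact absurd hke hpad
                  | k' + 1, hk =>
                    refine Or.inr ⟨k', by simpa using hk, by simpa using hke, ?_⟩
                    have hdk : pvDC ((c :: t).take (k' + 1)) = pvDC (t.take k') := by
                      simp [pvDC, hv]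
                    rw [hdk] at hkd
                    exact hkd
        rw [pvB64Go]
        rw [if_neg hpad]
        rw [hv]
        exact ih qp lc pads acc hqp hnew
      | some v =>
        -- data character: quad position advances to (qp + 1) % 4, pads resets
        have hnew : ∀ pads',
            (((qp + 1) % 4 + pvDC t) % 4 = 0 ∨
             ∃ j < t.length, t.getD j ' ' = '=' ∧
               (((qp + 1) % 4 + pvDC (t.take j)) % 4 = 3 ∨
                (((qp + 1) % 4 + pvDC (t.take j)) % 4 = 2 ∧
                  ((pvDC (t.take j) = 0 ∧ 1 ≤ pads') ∨
                   ∃ k < j, t.getD k ' ' = '=' ∧ pvDC (t.take k) = pvDC (t.take j))))) := by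
          intro pads'
          rcases h with h1 | ⟨j, hj, hje, hcond⟩
          · left
            have : pvDC (c :: t) = pvDC t + 1 := by simp [pvDC, hv]
            rw [this] at h1; omega
          · match j, hj with
            | 0, _ => simp at hje; exact absurd hje hpad
            | j' + 1, hj =>
              right
              refine ⟨j', by simpa using hj, by simpa using hje, ?_⟩
              have hdc : pvDC ((c :: t).take (j' + 1)) = pvDC (t.take j') + 1 := by
                simp [pvDC, hv]
              rw [hdc] at hcond
              rcases hcond with h3 | ⟨h2, hk⟩
              · exact Or.inl (by omega)
              · refine Or.inr ⟨by omega, ?_⟩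
                rcases hk with ⟨hz, _⟩ | ⟨k, hk, hke, hkd⟩
                · omega
                · match k, hk with
                  | 0, _ => simp at hke; exact absurd hke hpad
                  | k' + 1, hk =>
                    refine Or.inr ⟨k', by simpa using hk, by simpa using hke, ?_⟩
                    have hdk : pvDC ((c :: t).take (k' + 1)) = pvDC (t.take k') + 1 := by
                      simp [pvDC, hv]
                    rw [hdk] at hkd
                    omega
        rw [pvB64Go]
        rw [if_neg hpad]
        rw [hv]
        interval_cases qp
        · exact ih 1 v 0 acc (by omega) (by simpa using hnew 0)
        · exact ih 2 (v % 16) 0 _ (by omega) (by simpa using hnew 0)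
        · exact ih 3 (v % 4) 0 _ (by omega) (by simpa using hnew 0)
        · exact ih 0 0 0 _ (by omega) (by simpa using hnew 0)

theorem pvB64Decode?_isSome_of_pre (s : String) (hpre : Pre_extract_sol_sig_b58_py s) :
    (pvB64Decode? s).isSome := by
  apply pvB64Go_some s.toList 0 0 0 [] (by omega)
  rcases hpre with h1 | ⟨j, hj, hje, hcond⟩
  · left
    have : pvB64Data s.toList s.toList.length = pvDC s.toList := by
      unfold pvB64Data pvDC; rw [List.take_length]
    omega
  · right
    refine ⟨j, hj, hje, ?_⟩
    have hd : ∀ i, pvB64Data s.toList i = pvDC (s.toList.take i) := fun _ => rfl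
    rcases hcond with h3 | ⟨h2, k, hk, hke, hkd⟩
    · exact Or.inl (by rw [← hd]; omega)
    · exact Or.inr ⟨by rw [← hd]; omega, Or.inr ⟨k, hk, hke, by rw [← hd, ← hd]; omega⟩⟩

-- ===== VERDICT (by name: the statement is the Claim_ definition above) =====
theorem extract_sol_sig_b58_py_spec : Claim_equal_extract_sol_sig_b58_py := by
  intro s _ hpre
  unfold Spec_extract_sol_sig_b58_py extract_sol_sig_b58_py extract_sol_sig_b58_py_alt
  rw [pvB64DecodeB?_eq]
  cases h : pvB64Decode? s with
  | none => exact absurd (pvB64Decode?_isSome_of_pre s hpre) (by simp [h])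
  | some bytes =>
    simp only []
    congr 1
    rw [pvOnesA_eq, pvEncA_eq]
    have := pvFoldl_step (PySem.List.slice bytes (some (1 : Int)) (some (65 : Int))) 0
    rw [pvCanon_zero] at this
    rw [pvFromBytes, ← this]
    simp [List.map_reverse]
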